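-- pv_equiv track=rewrite | github.com/AP-MI-2021/lab-4-raresmaier234 | main.py | ListaElemCuDivProprii
-- ===== SOURCE A (Python) =====
-- def ListaElemCuDivProprii (l):
--     """
--     parametru l: reprezinta lista citita de utilizator
--     return: va returna lista finala, cu nr de divizori proprii dupa fiecare element citit
--     """
--     rez = []
--     for x in l:
--         rez.append(x)
--         divProp = 0
--         for i in range(2, x):
--             if x % i == 0:
--                 divProp += 1
--         rez.append(divProp)
--     return rez
-- ===== SOURCE B (Python) =====
-- def _proper_div_count(x):
--     # count divisors of x in [2, x-1] by pairing d with x // d up to sqrt(x)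
--     c = 0
--     d = 2
--     while d * d <= x:
--         if x % d == 0:
--             c += 1 if d * d == x else 2
--         d += 1
--     return c
--
--
-- def ListaElemCuDivProprii(l):
--     return [v for x in l for v in (x, _proper_div_count(x))]
-- ===== Notes on version B (the rewrite author's own statement) =====
-- stated objective: faster
-- what changed: Counts proper divisors by trial division only up to sqrt(x), counting each divisor d together with its cofactor x//d, instead of scanning every i in range(2, x); the output list is built with a flat comprehension instead of repeated appends.
import Mathlib
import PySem

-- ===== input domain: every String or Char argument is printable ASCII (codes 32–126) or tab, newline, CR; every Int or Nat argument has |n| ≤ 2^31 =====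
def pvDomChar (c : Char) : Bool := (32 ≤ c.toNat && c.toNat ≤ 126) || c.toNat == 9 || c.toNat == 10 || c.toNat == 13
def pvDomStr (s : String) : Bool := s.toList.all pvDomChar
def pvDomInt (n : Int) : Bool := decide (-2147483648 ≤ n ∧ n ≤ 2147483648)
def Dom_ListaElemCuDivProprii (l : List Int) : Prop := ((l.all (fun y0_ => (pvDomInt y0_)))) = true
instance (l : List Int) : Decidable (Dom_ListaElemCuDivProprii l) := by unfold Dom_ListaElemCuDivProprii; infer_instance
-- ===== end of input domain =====

-- B counts proper divisors by trial division only up to sqrt(x) (pairing each divisor d with its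
-- cofactor x/d) instead of scanning all of range(2, x); the return values are identical.

-- ===== PORT A =====
-- inner loop of A: 'for i in range(2, x): if x % i == 0: divProp += 1'
def ListaElemCuDivProprii (l : List Int) : List Int :=
  l.foldl (fun rez x =>
    (rez ++ [x]) ++
      [(PySem.List.pyRange 2 x 1).foldl
        (fun divProp i => if PySem.Int.mod x i = 0 then divProp + 1 else divProp) 0]) []

-- ===== PORT B =====
-- Source B's 'while d * d <= x' loop; the '0 < d' conjunct of the guard only makes the
-- recursion total (the loop is entered with d = 2 and d only grows, so it never fires).
def pvDivLoop (x d c : Int) : Int :=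
  if h : 0 < d ∧ d * d ≤ x then
    pvDivLoop x (d + 1) (if PySem.Int.mod x d = 0 then (if d * d = x then c + 1 else c + 2) else c)
  else c
termination_by (x + 1 - d).toNat
decreasing_by
  have h1 : 1 * d ≤ d * d := mul_le_mul_of_nonneg_right (by omega) (by omega)
  omega

-- '[v for x in l for v in (x, _proper_div_count(x))]'
def ListaElemCuDivProprii_alt (l : List Int) : List Int :=
  l.flatMap (fun x => [x, pvDivLoop x 2 0])

-- ===== PRECONDITION & SPEC =====
def Spec_ListaElemCuDivProprii (l : List Int) (out : List Int) : Prop := out = ListaElemCuDivProprii_alt l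
instance (l : List Int) (out : List Int) : Decidable (Spec_ListaElemCuDivProprii l out) := by unfold Spec_ListaElemCuDivProprii; infer_instance

-- ===== CLAIM (what is proved, stated in full; the proofs are below) =====
def Claim_equal_ListaElemCuDivProprii : Prop := ∀ (l : List Int), Dom_ListaElemCuDivProprii l → Spec_ListaElemCuDivProprii l (ListaElemCuDivProprii l)

-- ===== LEMMAS AND PROOFS =====

-- weight of e as a divisor of n found below sqrt n: a square root of n counts once, any
-- other divisor counts for itself and its cofactor
def pvW (n e : Nat) : Nat := if e ∣ n then (if e * e = n then 1 else 2) else 0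

-- pairing d ↔ n/d matches divisors of n above sqrt n with non-square-root divisors below it
theorem pvHeart (n : Nat) (hn : 3 ≤ n) :
    (∑ e ∈ Finset.Ico 2 n, (if e ∣ n then 1 else 0)) =
      ∑ e ∈ Finset.Ico 2 (Nat.sqrt n + 1), pvW n e := by
  set s := Nat.sqrt n with hs
  have h1n : 1 < n := by omega
  have hs1 : 1 ≤ s := Nat.le_sqrt'.mpr (by simpa using (by omega : 1 ≤ n))
  have hsn : s + 1 ≤ n := by
    have := Nat.sqrt_lt_self h1n
    omega
  have hsplit : Finset.Ico 2 n = Finset.Ico 2 (s+1) ∪ Finset.Ico (s+1) n :=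
    (Finset.Ico_union_Ico_eq_Ico (by omega) hsn).symm
  have hLcard : (∑ e ∈ Finset.Ico (s+1) n, (if e ∣ n then 1 else 0))
      = ((Finset.Ico (s+1) n).filter (· ∣ n)).card := (Finset.card_filter _ _).symm
  have hFcard : (∑ e ∈ Finset.Ico 2 (s+1), (if e ∣ n then 1 else 0))
      = ((Finset.Ico 2 (s+1)).filter (· ∣ n)).card := (Finset.card_filter _ _).symm
  have hbij : ((Finset.Ico (s+1) n).filter (· ∣ n)).card
      = (((Finset.Ico 2 (s+1)).filter (· ∣ n)).filter (fun e => e * e ≠ n)).card := by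
    apply Finset.card_nbij' (fun d => n / d) (fun e => n / e)
    · intro d hd
      simp only [Finset.coe_filter, Finset.mem_Ico, Set.mem_setOf_eq, Finset.mem_filter] at hd ⊢
      obtain ⟨⟨hd1, hd2⟩, e, he⟩ := hd
      have hd0 : 0 < d := by omega
      have hdiv : n / d = e := by rw [he, Nat.mul_div_cancel_left _ hd0]
      have hdd : n < (s+1) ^ 2 := Nat.lt_succ_sqrt' n
      have hdd2 : n < d * d := by nlinarith
      have hed : e < d := by nlinarith
      have heen : e * e < n := by nlinarith
      have he2 : 2 ≤ e := by nlinarith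
      have hes : e ≤ s := Nat.le_sqrt'.mpr (by nlinarith)
      rw [hdiv]
      exact ⟨⟨⟨by omega, by omega⟩, ⟨d, by rw [he]; ring⟩⟩, by omega⟩
    · intro e he
      simp only [Finset.coe_filter, Finset.mem_Ico, Set.mem_setOf_eq, Finset.mem_filter] at he ⊢
      obtain ⟨⟨⟨he1, he2⟩, d, hd⟩, hne⟩ := he
      have he0 : 0 < e := by omega
      have hdiv : n / e = d := by rw [hd, Nat.mul_div_cancel_left _ he0]
      have hd0 : 0 < d := by nlinarith
      have hees : e * e ≤ n := by
        have : e ^ 2 ≤ n := Nat.le_sqrt'.mp (by omega)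
        nlinarith
      have heltn : e * e < n := lt_of_le_of_ne hees hne
      have hed : e < d := by nlinarith
      have hsd : s < d := by
        rcases Nat.lt_or_ge s d with h | h
        · exact h
        · exfalso
          have : d ^ 2 ≤ n := Nat.le_sqrt'.mp h
          nlinarith
      rw [hdiv]
      exact ⟨⟨by omega, by nlinarith⟩, ⟨e, by rw [hd]; ring⟩⟩
    · intro d hd
      simp only [Finset.coe_filter, Finset.mem_Ico, Set.mem_setOf_eq, Finset.mem_filter] at hd
      exact Nat.div_div_self hd.2 (by omega)
    · intro e he
      simp only [Finset.coe_filter, Finset.mem_Ico, Set.mem_setOf_eq, Finset.mem_filter] at he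
      exact Nat.div_div_self he.1.2 (by omega)
  have hW : (∑ e ∈ Finset.Ico 2 (s+1), pvW n e)
      = ((Finset.Ico 2 (s+1)).filter (· ∣ n)).card
        + (((Finset.Ico 2 (s+1)).filter (· ∣ n)).filter (fun e => e * e ≠ n)).card := by
    unfold pvW
    rw [← Finset.sum_filter]
    have hstep : ∀ e ∈ (Finset.Ico 2 (s+1)).filter (· ∣ n),
        (if e * e = n then 1 else 2) = 1 + (if e * e ≠ n then (1:ℕ) else 0) := by
      intro e _
      by_cases h : e * e = n <;> simp [h]
    rw [Finset.sum_congr rfl hstep, Finset.sum_add_distrib, Finset.sum_const, smul_eq_mul,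
      mul_one, ← Finset.sum_filter]
    simp
  rw [hsplit, Finset.sum_union (Finset.Ico_disjoint_Ico_consecutive _ _ _), hFcard, hLcard, hbij, hW]

theorem pvModBridge (x a : Int) (hx : 0 ≤ x) (ha : 0 < a) :
    (PySem.Int.mod x a = 0) ↔ a.toNat ∣ x.toNat := by
  rw [PySem.Int.mod_eq_zero_iff_dvd]
  constructor
  · intro h
    exact Int.ofNat_dvd.mp (by rwa [Int.toNat_of_nonneg hx, Int.toNat_of_nonneg ha.le])
  · intro h
    have := Int.ofNat_dvd.mpr h
    rwa [Int.toNat_of_nonneg hx, Int.toNat_of_nonneg ha.le] at this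

theorem pvSqBridge (x d : Int) (hx : 0 ≤ x) (hd : 0 ≤ d) :
    (d * d = x) ↔ d.toNat * d.toNat = x.toNat := by
  constructor
  · intro h; rw [← h]; exact (Int.toNat_mul hd hd).symm ▸ rfl
  · intro h
    have : ((d.toNat * d.toNat : Nat) : Int) = ((x.toNat : Nat) : Int) := by exact_mod_cast h
    rwa [Nat.cast_mul, Int.toNat_of_nonneg hx, Int.toNat_of_nonneg hd] at this

-- A's inner loop counts the divisors of x in [a, x)
theorem pvG1 (x : Int) (hx : 3 ≤ x) : ∀ (m : Nat) (a c : Int), 2 ≤ a → (x - a).toNat = m →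
    (PySem.List.pyRange a x 1).foldl
        (fun dp i => if PySem.Int.mod x i = 0 then dp + 1 else dp) c
      = c + ↑(∑ e ∈ Finset.Ico a.toNat x.toNat, (if e ∣ x.toNat then 1 else 0)) := by
  intro m
  induction m with
  | zero =>
      intro a c ha hm
      rw [PySem.List.pyRange_one_eq_nil (by omega)]
      rw [Finset.Ico_eq_empty (by omega)]
      simp
  | succ k ih =>
      intro a c ha hm
      have hax : a < x := by omega
      rw [PySem.List.pyRange_one_cons hax, List.foldl_cons]
      rw [Finset.sum_eq_sum_Ico_succ_bot (by omega : a.toNat < x.toNat)]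
      rw [ih (a + 1) (if PySem.Int.mod x a = 0 then c + 1 else c) (by omega) (by omega)]
      have htn : (a + 1).toNat = a.toNat + 1 := by omega
      rw [htn]
      simp only [pvModBridge x a (by omega) (by omega)]
      by_cases h : a.toNat ∣ x.toNat <;> simp [h] <;> push_cast <;> ring

-- B's while loop adds the pvW-weights of [d, sqrt(x)] to the accumulator
theorem pvG2 (x : Int) : ∀ (m : Nat) (d c : Int), 2 ≤ d → (x + 1 - d).toNat = m →
    pvDivLoop x d c = c + ↑(∑ e ∈ Finset.Ico d.toNat (Nat.sqrt x.toNat + 1), pvW x.toNat e) := by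
  intro m
  induction m with
  | zero =>
      intro d c hd hm
      have hxd : x < d := by omega
      have hnotsq : ¬ (d * d ≤ x) := by nlinarith
      rw [pvDivLoop, dif_neg (fun hc => hnotsq hc.2)]
      have hempty : Nat.sqrt x.toNat + 1 ≤ d.toNat := by
        have : Nat.sqrt x.toNat ≤ x.toNat := Nat.sqrt_le_self _
        omega
      rw [Finset.Ico_eq_empty (by omega)]
      simp
  | succ k ih =>
      intro d c hd hm
      by_cases hsq : d * d ≤ x
      · have hx0 : 0 ≤ x := by nlinarith
        have hsqn : d.toNat * d.toNat ≤ x.toNat := by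
          have : ((d.toNat * d.toNat : Nat) : Int) ≤ ((x.toNat : Nat) : Int) := by
            push_cast
            rw [Int.toNat_of_nonneg hx0, Int.toNat_of_nonneg (by omega : (0:Int) ≤ d)]
            exact hsq
          exact_mod_cast this
        have hdle : d.toNat ≤ Nat.sqrt x.toNat := Nat.le_sqrt'.mpr (by nlinarith [hsqn])
        rw [pvDivLoop, dif_pos ⟨by omega, hsq⟩]
        rw [ih (d + 1) _ (by omega) (by omega)]
        rw [Finset.sum_eq_sum_Ico_succ_bot (by omega : d.toNat < Nat.sqrt x.toNat + 1)]
        have htn : (d + 1).toNat = d.toNat + 1 := by omega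
        rw [htn]
        unfold pvW
        simp only [pvModBridge x d hx0 (by omega), pvSqBridge x d hx0 (by omega)]
        by_cases h1 : d.toNat ∣ x.toNat
        · by_cases h2 : d.toNat * d.toNat = x.toNat <;> simp [h1, h2] <;> push_cast <;> ring
        · simp [h1]
      · rw [pvDivLoop, dif_neg (fun hc => hsq hc.2)]
        have hempty : Nat.sqrt x.toNat + 1 ≤ d.toNat := by
          rcases le_or_gt 0 x with hx0 | hx0
          · have hlt : x.toNat < d.toNat * d.toNat := by
              have hxdd : x < d * d := by omega
              have h2 : ((x.toNat : Nat) : Int) < ((d.toNat * d.toNat : Nat) : Int) := by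
                push_cast
                rw [Int.toNat_of_nonneg hx0, Int.toNat_of_nonneg (by omega : (0:Int) ≤ d)]
                exact hxdd
              exact_mod_cast h2
            have : Nat.sqrt x.toNat < d.toNat := Nat.sqrt_lt'.mpr (by nlinarith)
            omega
          · have hz : x.toNat = 0 := by omega
            rw [hz]
            simp [Nat.sqrt]
            omega
        rw [Finset.Ico_eq_empty (by omega)]
        simp

-- the two divisor counts agree for every integer
theorem pv_divA_eq (x : Int) :
    (PySem.List.pyRange 2 x 1).foldl
        (fun divProp i => if PySem.Int.mod x i = 0 then divProp + 1 else divProp) 0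
      = pvDivLoop x 2 0 := by
  by_cases hx : 3 ≤ x
  · rw [pvG1 x hx (x - 2).toNat 2 0 (by omega) rfl,
      pvG2 x (x + 1 - 2).toNat 2 0 (by omega) rfl]
    have h2 : (2 : Int).toNat = 2 := rfl
    rw [h2]
    have hn3 : 3 ≤ x.toNat := by omega
    have hh := pvHeart x.toNat hn3
    simp only [zero_add]
    exact_mod_cast hh
  · rw [PySem.List.pyRange_one_eq_nil (by omega), pvDivLoop,
      dif_neg (fun hc => hx (by nlinarith [hc.2]))]
    simp

theorem pv_outer (l : List Int) (acc : List Int) :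
    l.foldl (fun rez x =>
      (rez ++ [x]) ++
        [(PySem.List.pyRange 2 x 1).foldl
          (fun divProp i => if PySem.Int.mod x i = 0 then divProp + 1 else divProp) 0]) acc
      = acc ++ l.flatMap (fun x => [x, pvDivLoop x 2 0]) := by
  induction l generalizing acc with
  | nil => simp
  | cons y t ih =>
      rw [List.foldl_cons, ih, List.flatMap_cons, pv_divA_eq]
      simp

-- ===== VERDICT (by name: the statement is the Claim_ definition above) =====
theorem ListaElemCuDivProprii_spec : Claim_equal_ListaElemCuDivProprii := by
  intro l _
  unfold Spec_ListaElemCuDivProprii ListaElemCuDivProprii ListaElemCuDivProprii_alt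
  simpa using pv_outer l []
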